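-- pv_equiv track=rewrite | github.com/vil02/pi2022 | python/make_escape_curve_animations.py | apply_dict
-- ===== SOURCE A (Python) =====
-- def apply_dict(in_tex_name, in_dict):
--     res = None
--     for (cur_key, cur_val) in in_dict.items():
--         if cur_key in in_tex_name:
--             for _ in in_dict.keys():
--                 if cur_key != _:
--                     assert _ not in in_tex_name
--             res = cur_val
--             break
--     assert res is not None
--     return res
-- ===== SOURCE B (Python) =====
-- def apply_dict(in_tex_name, in_dict):
--     def go(items):
--         # recursion over the item list, processed back-to-front:
--         # returns (number of keys contained in in_tex_name, value of the FIRST such key)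
--         if not items:
--             return (0, None)
--         (key, val), rest = items[0], items[1:]
--         count, first = go(rest)
--         if key in in_tex_name:
--             return (count + 1, val)
--         return (count, first)
--
--     count, res = go(list(in_dict.items()))
--     assert count == 1
--     assert res is not None
--     return res
-- ===== Notes on version B (the rewrite author's own statement) =====
-- stated objective: alternative
-- what changed: Replaces A's imperative first-match loop with an inner validation scan over all keys by a structural recursion over the item list that folds back-to-front into a (match-count, first-match-value) pair, asserting the count is exactly one afterwards.
import Mathlib
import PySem

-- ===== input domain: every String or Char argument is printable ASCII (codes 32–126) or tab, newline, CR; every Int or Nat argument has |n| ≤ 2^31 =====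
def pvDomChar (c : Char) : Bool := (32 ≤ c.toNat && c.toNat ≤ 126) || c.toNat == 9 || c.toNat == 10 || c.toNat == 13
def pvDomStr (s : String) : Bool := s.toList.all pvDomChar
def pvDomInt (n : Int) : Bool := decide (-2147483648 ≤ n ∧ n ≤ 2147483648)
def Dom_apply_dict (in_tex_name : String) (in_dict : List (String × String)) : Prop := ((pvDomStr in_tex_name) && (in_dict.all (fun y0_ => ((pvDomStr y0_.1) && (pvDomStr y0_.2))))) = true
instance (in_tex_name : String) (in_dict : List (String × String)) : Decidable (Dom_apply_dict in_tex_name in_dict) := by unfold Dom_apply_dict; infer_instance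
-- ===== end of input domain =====

-- B replaces A's first-match loop with inner validation scan by a back-to-front structural
-- recursion into a (match-count, first-match-value) pair; proved equal on Pre_ (exactly one match).
-- ===== PORT A =====
-- the for-loop of A: scan items; at the first key contained in the name, run the inner
-- validation loop over all keys (assert failure = none), set res and break; [] = res stays None
def applyDictLoopA (in_tex_name : String) (all : List (String × String)) :
    List (String × String) → Option String
  | [] => none
  | (k, v) :: rest =>
    if PySem.Str.isIn k in_tex_name then
      if all.all (fun q => q.1 == k || !(PySem.Str.isIn q.1 in_tex_name)) then some v
      else none
    else applyDictLoopA in_tex_name all rest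

-- none = the Python raises AssertionError (excluded by Pre_); "" is a dummy there
def apply_dict (in_tex_name : String) (in_dict : List (String × String)) : String :=
  (applyDictLoopA in_tex_name in_dict in_dict).getD ""

-- ===== PORT B =====
-- B's recursive 'go': back-to-front fold returning (match count, first match's value)
def applyDictGoB (in_tex_name : String) : List (String × String) → Nat × Option String
  | [] => (0, none)
  | (k, v) :: rest =>
    let p := applyDictGoB in_tex_name rest
    if PySem.Str.isIn k in_tex_name then (p.1 + 1, some v) else p

-- "" is a dummy where B's asserts fail (excluded by Pre_)
def apply_dict_alt (in_tex_name : String) (in_dict : List (String × String)) : String :=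
  let p := applyDictGoB in_tex_name in_dict
  if p.1 == 1 then p.2.getD "" else ""

-- ===== PRECONDITION & SPEC =====
-- Pre_: exactly one pair of in_dict has its key contained in in_tex_name; on every other
-- input the Python A raises AssertionError (no match, or two distinct matching keys; a
-- duplicated matching key cannot occur in a real Python dict).
def Pre_apply_dict (in_tex_name : String) (in_dict : List (String × String)) : Prop :=
  (in_dict.filter (fun p => PySem.Str.isIn p.1 in_tex_name)).length = 1
instance (in_tex_name : String) (in_dict : List (String × String)) : Decidable (Pre_apply_dict in_tex_name in_dict) := by unfold Pre_apply_dict; infer_instance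

def pvWitness_apply_dict : String × (List (String × String)) := ("abc", [("b", "x"), ("z", "y")])

def Spec_apply_dict (in_tex_name : String) (in_dict : List (String × String)) (out : String) : Prop := out = apply_dict_alt in_tex_name in_dict
instance (in_tex_name : String) (in_dict : List (String × String)) (out : String) : Decidable (Spec_apply_dict in_tex_name in_dict out) := by unfold Spec_apply_dict; infer_instance

-- ===== CLAIM (what is proved, stated in full; the proofs are below) =====
def Claim_equal_apply_dict : Prop := ∀ (in_tex_name : String) (in_dict : List (String × String)), Dom_apply_dict in_tex_name in_dict → Pre_apply_dict in_tex_name in_dict → Spec_apply_dict in_tex_name in_dict (apply_dict in_tex_name in_dict)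

-- ===== LEMMAS AND PROOFS =====
-- B's recursion computes (number of matches, value of the first match)
theorem applyDictGoB_eq (in_tex_name : String) (l : List (String × String)) :
    applyDictGoB in_tex_name l =
      ((l.filter (fun p => PySem.Str.isIn p.1 in_tex_name)).length,
       (l.filter (fun p => PySem.Str.isIn p.1 in_tex_name)).head?.map Prod.snd) := by
  induction l with
  | nil => simp [applyDictGoB]
  | cons p rest ih =>
    obtain ⟨k, v⟩ := p
    simp only [applyDictGoB, ih]
    by_cases hp : PySem.Str.isIn k in_tex_name
    · rw [if_pos hp, List.filter_cons_of_pos (by simpa using hp)]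
      simp
    · rw [if_neg hp, List.filter_cons_of_neg (by simpa using hp)]

-- if the matches of l are exactly [(k, v)] and the validation check passes on (k, v),
-- A's loop over l returns v
theorem applyDictLoopA_eq (in_tex_name k v : String) (all l : List (String × String))
    (hall : all.all (fun q => q.1 == k || !(PySem.Str.isIn q.1 in_tex_name)) = true)
    (hf : l.filter (fun p => PySem.Str.isIn p.1 in_tex_name) = [(k, v)]) :
    applyDictLoopA in_tex_name all l = some v := by
  induction l with
  | nil => simp at hf
  | cons p rest ih =>
    obtain ⟨k', v'⟩ := p
    by_cases hp : PySem.Str.isIn k' in_tex_name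
    · rw [List.filter_cons_of_pos (by simpa using hp)] at hf
      obtain ⟨h1, _⟩ := List.cons_eq_cons.mp hf
      obtain ⟨rfl, rfl⟩ := Prod.mk.injEq .. ▸ h1
      simp only [applyDictLoopA, if_pos hp, if_pos hall]
    · rw [List.filter_cons_of_neg (by simpa using hp)] at hf
      simp only [applyDictLoopA, if_neg hp]
      exact ih hf

-- ===== VERDICT (by name: the statement is the Claim_ definition above) =====
theorem apply_dict_spec : Claim_equal_apply_dict := by
  intro name d _ hpre
  unfold Pre_apply_dict at hpre
  obtain ⟨⟨k, v⟩, hf⟩ : ∃ p, d.filter (fun p => PySem.Str.isIn p.1 name) = [p] := by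
    match h : d.filter (fun p => PySem.Str.isIn p.1 name) with
    | [p] => exact ⟨p, h⟩
    | [] => rw [h] at hpre; simp at hpre
    | p :: q :: r => rw [h] at hpre; simp at hpre
  have hall : d.all (fun q => q.1 == k || !(PySem.Str.isIn q.1 name)) = true := by
    rw [List.all_eq_true]
    intro q hq
    by_cases hs : PySem.Str.isIn q.1 name
    · have hmem : q ∈ d.filter (fun p => PySem.Str.isIn p.1 name) :=
        List.mem_filter.mpr ⟨hq, by simpa using hs⟩
      rw [hf, List.mem_singleton] at hmem
      simp [hmem]
    · simp only [Bool.not_eq_true] at hs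
      simp only [PySem.Str.isIn_eq] at hs
      simp [hs]
  unfold Spec_apply_dict apply_dict apply_dict_alt
  rw [applyDictLoopA_eq name k v d d hall hf, applyDictGoB_eq, hf]
  rfl
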